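-- pv_equiv track=rewrite | github.com/abcdabcd3899/DLZoo | DIDL/nlp_preprocessing.py | count_corpus
-- ===== SOURCE A (Python) =====
-- import collections
--
-- def count_corpus(tokens):
--     # 这里的 `tokens` 是 1D 列表或 2D 列表
--     if len(tokens) == 0 or isinstance(tokens[0], list):   # isinstance 就是判断tokens[0]是不是list类型
--         # 将标记列表展平成使用标记填充的一个列表
--         results = []
--         for line in tokens:
--           for t in line:
--             results.append(t)
--         tokens = results
--     return collections.Counter(tokens)
-- ===== SOURCE B (Python) =====
-- import collections
--
-- def count_corpus(tokens):
--     # B: same dispatch; 2D branch builds one Counter per line and merges them,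
--     # instead of flattening into one list and counting once.
--     if len(tokens) == 0 or isinstance(tokens[0], list):
--         total = collections.Counter()
--         for line in tokens:
--             total += collections.Counter(line)
--         return total
--     return collections.Counter(tokens)
-- ===== Notes on version B (the rewrite author's own statement) =====
-- stated objective: alternative
-- what changed: A flattens the 2D token list into one big list and counts it once; B never builds the flat list, instead building one Counter per line and merging them with Counter addition (total += Counter(line)).
import Mathlib
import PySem

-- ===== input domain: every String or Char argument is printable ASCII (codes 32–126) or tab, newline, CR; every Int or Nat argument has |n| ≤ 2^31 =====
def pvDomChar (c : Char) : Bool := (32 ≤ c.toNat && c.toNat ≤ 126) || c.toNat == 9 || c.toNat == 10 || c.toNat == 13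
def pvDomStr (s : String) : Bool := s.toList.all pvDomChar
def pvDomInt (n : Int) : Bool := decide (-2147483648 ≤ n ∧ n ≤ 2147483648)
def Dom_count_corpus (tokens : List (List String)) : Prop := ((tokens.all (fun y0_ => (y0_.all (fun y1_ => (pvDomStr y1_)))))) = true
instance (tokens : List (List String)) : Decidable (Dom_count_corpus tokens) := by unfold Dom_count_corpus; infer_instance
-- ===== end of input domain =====

-- B replaces A's flatten-then-count by one Counter per line merged with Counter addition (alternative decomposition).
-- Under the type List (List String) the Python guard `len(tokens)==0 or isinstance(tokens[0], list)` is always true,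
-- so both ports take the 2D branch unconditionally.

-- ===== PORT A =====
-- results = []; for line in tokens: for t in line: results.append(t); return Counter(results)
def count_corpus (tokens : List (List String)) : List (String × Int) :=
  let results := tokens.foldl (fun acc line => line.foldl (fun acc t => acc ++ [t]) acc) []
  (PySem.Dict.counter results).items

-- ===== PORT B =====
-- total += Counter(line): for (k, c) in Counter(line).items(): total[k] = total.get(k, 0) + c.
-- (Counter.__iadd__'s removal of non-positive counts is a no-op here: every merged count is positive.)
def pvMergeCounter (total : PySem.Dict String Int) (c : PySem.Dict String Int) : PySem.Dict String Int :=
  c.items.foldl (fun a p => a.modify p.1 0 (· + p.2)) total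

def count_corpus_alt (tokens : List (List String)) : List (String × Int) :=
  (tokens.foldl (fun total line => pvMergeCounter total (PySem.Dict.counter line)) PySem.Dict.empty).items

-- ===== PRECONDITION & SPEC =====
def Spec_count_corpus (tokens : List (List String)) (out : List (String × Int)) : Prop := out = count_corpus_alt tokens
instance (tokens : List (List String)) (out : List (String × Int)) : Decidable (Spec_count_corpus tokens out) := by unfold Spec_count_corpus; infer_instance

-- ===== CLAIM (what is proved, stated in full; the proofs are below) =====
def Claim_equal_count_corpus : Prop := ∀ (tokens : List (List String)), Dom_count_corpus tokens → Spec_count_corpus tokens (count_corpus tokens)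

-- ===== LEMMAS AND PROOFS =====

-- d.modify k 0 f is d.insert k (f (d.getD k 0)) by definition
theorem pv_modify_eq (d : PySem.Dict String Int) (k : String) (f : Int → Int) :
    d.modify k 0 f = d.insert k (f (d.getD k 0)) := rfl

-- two inserts at distinct keys commute as dicts, provided the first key is already present
theorem pv_insert_insert_comm (b : PySem.Dict String Int) (x k : String) (A B : Int)
    (hx : b.contains x = true) (hne : k ≠ x) :
    (b.insert x A).insert k B = (b.insert k B).insert x A := by
  apply PySem.Dict.ext
  have hkx : (b.insert k B).contains x = true := by
    rw [PySem.Dict.contains_insert]; simp [hx]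
  by_cases hk : b.contains k = true
  · have hxk : (b.insert x A).contains k = true := by
      rw [PySem.Dict.contains_insert]; simp [hk]
    rw [PySem.Dict.items_insert_of_contains _ B hxk,
        PySem.Dict.items_insert_of_contains _ A hx,
        PySem.Dict.items_insert_of_contains _ A hkx,
        PySem.Dict.items_insert_of_contains _ B hk,
        List.map_map, List.map_map]
    apply List.map_congr_left
    intro p _
    by_cases h1 : p.1 = x <;> by_cases h2 : p.1 = k <;> simp_all [Function.comp]
  · have hk' : b.contains k = false := by simpa using hk
    have hxk : (b.insert x A).contains k = false := by
      rw [PySem.Dict.contains_insert]; simp [hk', hne]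
    rw [PySem.Dict.items_insert_of_not_contains _ B hxk,
        PySem.Dict.items_insert_of_contains _ A hx,
        PySem.Dict.items_insert_of_contains _ A hkx,
        PySem.Dict.items_insert_of_not_contains _ B hk',
        List.map_append]
    simp [hne]

-- incrementing at a key x absent from l commutes past the merge fold over l
theorem pv_commute (x : String) (l : List (String × Int)) :
    ∀ (b : PySem.Dict String Int), b.contains x = true → x ∉ l.map (·.1) →
    l.foldl (fun a p => a.modify p.1 0 (· + p.2)) (b.modify x 0 (· + 1)) =
      (l.foldl (fun a p => a.modify p.1 0 (· + p.2)) b).modify x 0 (· + 1) := by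
  induction l with
  | nil => intro b _ _; rfl
  | cons p t ih =>
    intro b hx hmem
    have hne : p.1 ≠ x := by simp at hmem; exact fun h => hmem.1 h.symm
    have hmem' : x ∉ t.map (·.1) := by simp at hmem ⊢; exact hmem.2
    have hstep : (b.modify x 0 (· + 1)).modify p.1 0 (· + p.2)
        = (b.modify p.1 0 (· + p.2)).modify x 0 (· + 1) := by
      rw [pv_modify_eq b x, pv_modify_eq b p.1,
          pv_modify_eq (b.insert x (b.getD x 0 + 1)) p.1,
          pv_modify_eq (b.insert p.1 (b.getD p.1 0 + p.2)) x,
          PySem.Dict.getD_insert_of_ne _ _ _ hne,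
          PySem.Dict.getD_insert_of_ne _ _ _ (Ne.symm hne)]
      exact pv_insert_insert_comm b x p.1 _ _ hx hne
    have hcont : (b.modify p.1 0 (· + p.2)).contains x = true := by
      rw [pv_modify_eq, PySem.Dict.contains_insert]; simp [hx]
    simp only [List.foldl_cons, hstep]
    exact ih _ hcont hmem'

-- merging an item list whose (unique) entry at x was bumped = merging, then incrementing at x
theorem pv_core (x : String) (l1 l2 : List (String × Int)) (v : Int) (d : PySem.Dict String Int)
    (h2 : x ∉ l2.map (·.1)) :
    (l1 ++ (x, v + 1) :: l2).foldl (fun a p => a.modify p.1 0 (· + p.2)) d =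
      ((l1 ++ (x, v) :: l2).foldl (fun a p => a.modify p.1 0 (· + p.2)) d).modify x 0 (· + 1) := by
  rw [List.foldl_append, List.foldl_append, List.foldl_cons, List.foldl_cons]
  set a := l1.foldl (fun a p => a.modify p.1 0 (· + p.2)) d with ha
  have hb : (a.modify x 0 (· + v)).contains x = true := by
    rw [pv_modify_eq]; exact PySem.Dict.contains_insert_self _ _ _
  rw [← pv_commute x l2 _ hb h2]
  congr 1
  rw [pv_modify_eq, pv_modify_eq, pv_modify_eq, PySem.Dict.getD_insert_self,
      PySem.Dict.insert_insert_self]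
  ring_nf

theorem pv_bump_map_id (x : String) (l : List (String × Int)) (u : Int)
    (h : x ∉ l.map (·.1)) :
    l.map (fun p => if (p.1 == x) = true then (x, u) else p) = l := by
  induction l with
  | nil => rfl
  | cons p t ih =>
    rw [List.map_cons, List.mem_cons] at h
    push Not at h
    have h1 : (p.1 == x) = false := by simp; exact fun hh => h.1 hh.symm
    rw [List.map_cons, h1, ih h.2]
    simp

theorem pv_merge_inc (d e : PySem.Dict String Int) (x : String) (hnd : e.keys.Nodup) :
    pvMergeCounter d (e.modify x 0 (· + 1)) = (pvMergeCounter d e).modify x 0 (· + 1) := by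
  unfold pvMergeCounter
  rw [pv_modify_eq e x]
  by_cases hc : e.contains x = true
  · -- x is already a key of e: the insert bumps its (unique) item in place
    have hxk : x ∈ e.items.map (·.1) := (PySem.Dict.contains_iff_mem_keys e x).mp hc
    obtain ⟨p, hp, hp1⟩ := List.mem_map.mp hxk
    obtain ⟨l1, l2, hsplit⟩ := List.append_of_mem hp
    obtain ⟨px, pv⟩ := p
    simp only at hp1
    subst hp1
    have hnd' : (l1.map (·.1) ++ px :: l2.map (·.1)).Nodup := by
      have : e.keys = e.items.map (·.1) := rfl
      rw [this, hsplit, List.map_append, List.map_cons] at hnd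
      exact hnd
    have hx1 : px ∉ l1.map (·.1) := fun hmem =>
      List.disjoint_of_nodup_append hnd' hmem (by simp)
    have hx2 : px ∉ l2.map (·.1) := by
      have := (List.Nodup.of_append_right hnd')
      exact (List.nodup_cons.mp this).1
    have hgd : e.getD px 0 = pv :=
      PySem.Dict.getD_of_mem_items e
        (hsplit ▸ List.mem_append_right l1 (List.mem_cons_self)) hnd 0
    rw [PySem.Dict.items_insert_of_contains _ _ hc, hsplit, hgd,
        List.map_append, List.map_cons, pv_bump_map_id px l1 _ hx1, pv_bump_map_id px l2 _ hx2]
    simp only [BEq.rfl]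
    exact pv_core px l1 l2 pv d hx2
  · have hc' : e.contains x = false := by simpa using hc
    rw [PySem.Dict.getD_of_not_contains _ _ hc',
        PySem.Dict.items_insert_of_not_contains _ _ hc',
        List.foldl_append]
    simp [pv_modify_eq]

-- merging a partially built counter = continuing the counting loop on the merge
theorem pv_merge_foldl (l : List String) :
    ∀ (e d : PySem.Dict String Int), e.keys.Nodup →
    pvMergeCounter d (l.foldl (fun a x => a.modify x 0 (· + 1)) e) =
      l.foldl (fun a x => a.modify x 0 (· + 1)) (pvMergeCounter d e) := by
  induction l with
  | nil => intro e d _; rfl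
  | cons x t ih =>
    intro e d hnd
    have hnd' : (e.modify x 0 (· + 1)).keys.Nodup := by
      rw [pv_modify_eq]; exact PySem.Dict.nodup_keys_insert _ _ _ hnd
    simp only [List.foldl_cons]
    rw [ih _ d hnd', pv_merge_inc d e x hnd]

-- total += Counter(line)  ≡  counting line's tokens one by one into total
theorem pv_merge_counter (d : PySem.Dict String Int) (l : List String) :
    pvMergeCounter d (PySem.Dict.counter l) = l.foldl (fun a x => a.modify x 0 (· + 1)) d := by
  rw [PySem.Dict.counter_eq_foldl,
      pv_merge_foldl l PySem.Dict.empty d (by simp [pysem])]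
  rfl

-- B's merge loop computes the counter of the flattened corpus
theorem pv_alt_counter (tokens : List (List String)) :
    ∀ (d : PySem.Dict String Int),
    tokens.foldl (fun total line => pvMergeCounter total (PySem.Dict.counter line)) d =
      tokens.flatten.foldl (fun a x => a.modify x 0 (· + 1)) d := by
  induction tokens with
  | nil => intro d; rfl
  | cons line rest ih =>
    intro d
    simp only [List.foldl_cons, List.flatten_cons, List.foldl_append]
    rw [ih, pv_merge_counter]

-- A's nested append loop flattens the corpus
theorem pv_flatten (tokens : List (List String)) :
    ∀ (acc : List String),
    tokens.foldl (fun acc line => line.foldl (fun acc t => acc ++ [t]) acc) acc =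
      acc ++ tokens.flatten := by
  induction tokens with
  | nil => intro acc; simp
  | cons line rest ih =>
    intro acc
    simp only [List.foldl_cons, List.flatten_cons]
    rw [PySem.List.foldl_append_singleton, ih, List.append_assoc]

-- ===== VERDICT (by name: the statement is the Claim_ definition above) =====
theorem count_corpus_spec : Claim_equal_count_corpus := by
  intro tokens _
  show count_corpus tokens = count_corpus_alt tokens
  unfold count_corpus count_corpus_alt
  simp only []
  rw [pv_flatten tokens [], pv_alt_counter tokens, List.nil_append,
      PySem.Dict.counter_eq_foldl]
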